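-- pv_equiv track=rewrite | github.com/RikyDataScientist/daily-python-practice | exercises/day-05.py | validate_euro
-- ===== SOURCE A (Python) =====
-- Alphabet = {
--  'A': 1, 'B': 2, 'C': 3, 'D': 4, 'E': 5, 'F': 6,
--  'G': 7, 'H': 8, 'I': 9, 'J': 10, 'K': 11, 'L': 12,
--  'M': 13, 'N': 14, 'O': 15, 'P': 16, 'Q': 17, 'R': 18,
--  'S': 19, 'T': 20, 'U': 21, 'V': 22, 'W': 23, 'X': 24,
--  'Y': 25, 'Z': 26
-- }
--
-- def validate_euro(serial_number):
--     convert = 0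
--     for i in serial_number:
--         if i.isalpha():
--             convert += Alphabet[i]
--         else:
--             convert += int(i)
--     while convert >= 10:
--         convert = sum(int(d) for d in str(convert))
--     if convert == 7:
--         return True
--     else:
--         return False
-- ===== SOURCE B (Python) =====
-- def validate_euro(serial_number):
--     total = 0
--     for c in serial_number:
--         total += ord(c) - (64 if c.isalpha() else 48)
--     return total % 9 == 7
-- ===== Notes on version B (the rewrite author's own statement) =====
-- stated objective: simpler
-- what changed: Replaces the 26-entry letter dictionary by ord() arithmetic and deletes the repeated digital-root while-loop in favour of the closed-form test total % 9 == 7 (digital root of a positive n is 1+(n-1)%9, and 0 maps to False either way).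
import Mathlib
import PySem

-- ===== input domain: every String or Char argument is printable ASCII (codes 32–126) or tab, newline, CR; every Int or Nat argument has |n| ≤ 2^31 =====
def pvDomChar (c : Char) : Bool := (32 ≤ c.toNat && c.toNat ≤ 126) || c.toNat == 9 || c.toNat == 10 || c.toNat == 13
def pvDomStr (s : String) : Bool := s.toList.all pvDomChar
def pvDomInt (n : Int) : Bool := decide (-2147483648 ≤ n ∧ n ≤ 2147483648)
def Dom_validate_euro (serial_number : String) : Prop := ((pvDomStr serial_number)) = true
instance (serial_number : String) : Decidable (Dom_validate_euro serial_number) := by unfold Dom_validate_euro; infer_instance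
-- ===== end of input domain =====

-- B replaces A's letter dictionary by ord() arithmetic and A's digital-root while-loop by the closed-form test total % 9 == 7 (simpler).

-- ===== PORT A =====
def euroAlphabet : PySem.Dict String Int := PySem.Dict.ofList
  [("A",1),("B",2),("C",3),("D",4),("E",5),("F",6),("G",7),("H",8),("I",9),
   ("J",10),("K",11),("L",12),("M",13),("N",14),("O",15),("P",16),("Q",17),("R",18),
   ("S",19),("T",20),("U",21),("V",22),("W",23),("X",24),("Y",25),("Z",26)]

-- sum(int(d) for d in str(convert))
def euroDigitSum (n : Int) : Int :=
  (PySem.Int.toChars n).foldl (fun a d => a + (PySem.Int.ofChars? [d]).getD 0) 0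

-- the 'while convert >= 10' loop; fuel only makes the same computation total
-- (each pass strictly shrinks a value ≥ 10, so 'convert.toNat' passes always suffice)
def euroLoop : Nat → Int → Int
  | 0, n => n
  | fuel+1, n => if n ≥ 10 then euroLoop fuel (euroDigitSum n) else n

def validate_euro (serial_number : String) : Bool :=
  -- Alphabet[i] / int(i) raise on chars outside A-Z / 0-9; those inputs are excluded by Pre_ (the .getD 0 defaults are never reached there)
  let convert := serial_number.toList.foldl
    (fun convert i =>
      if PySem.Chars.isalpha i then convert + euroAlphabet.getD (String.ofList [i]) 0
      else convert + (PySem.Int.ofChars? [i]).getD 0) 0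
  let convert := euroLoop convert.toNat convert
  if convert = 7 then true else false

-- ===== PORT B =====
def validate_euro_alt (serial_number : String) : Bool :=
  let total := serial_number.toList.foldl
    (fun total c => total + ((c.toNat : Int) - (if PySem.Chars.isalpha c then 64 else 48))) 0
  PySem.Int.mod total 9 == 7

-- ===== PRECONDITION & SPEC =====
-- Pre_ excludes exactly the inputs where A raises: a char that is neither an ASCII
-- uppercase letter (KeyError in Alphabet[i], e.g. lowercase) nor a digit (ValueError in int(i)).
def euroChars : List Char :=
  ['A','B','C','D','E','F','G','H','I','J','K','L','M','N','O','P','Q','R','S','T',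
   'U','V','W','X','Y','Z','0','1','2','3','4','5','6','7','8','9']

def Pre_validate_euro (serial_number : String) : Prop :=
  serial_number.toList.all (fun c => euroChars.contains c) = true
instance (serial_number : String) : Decidable (Pre_validate_euro serial_number) := by unfold Pre_validate_euro; infer_instance

def pvWitness_validate_euro : String := "EURO2024X7"

def Spec_validate_euro (serial_number : String) (out : Bool) : Prop := out = validate_euro_alt serial_number
instance (serial_number : String) (out : Bool) : Decidable (Spec_validate_euro serial_number out) := by unfold Spec_validate_euro; infer_instance

-- ===== CLAIM (what is proved, stated in full; the proofs are below) =====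
def Claim_equal_validate_euro : Prop := ∀ (serial_number : String), Dom_validate_euro serial_number → Pre_validate_euro serial_number → Spec_validate_euro serial_number (validate_euro serial_number)

-- ===== LEMMAS AND PROOFS =====

-- per-character value functions of the two folds
def euroValA (c : Char) : Int :=
  if PySem.Chars.isalpha c then euroAlphabet.getD (String.ofList [c]) 0
  else (PySem.Int.ofChars? [c]).getD 0

def euroValB (c : Char) : Int :=
  (c.toNat : Int) - (if PySem.Chars.isalpha c then 64 else 48)

set_option maxRecDepth 2000 in
lemma euroVal_eq_and_nonneg (c : Char) (hc : c ∈ euroChars) :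
    euroValA c = euroValB c ∧ 0 ≤ euroValB c := by
  fin_cases hc <;> constructor <;> decide

-- int-value of one char produced by Nat.digitChar
lemma euroCharVal_digitChar (d : Nat) (hd : d < 10) :
    (PySem.Int.ofChars? [Nat.digitChar d]).getD 0 = (d : Int) := by
  interval_cases d <;> decide

lemma euroToDigitsCore_sum (fuel : Nat) : ∀ (n : Nat) (acc : List Char), n < fuel →
    ((Nat.toDigitsCore 10 fuel n acc).map (fun d => (PySem.Int.ofChars? [d]).getD 0)).sum
      = ((Nat.digits 10 n).sum : Int) + ((acc.map (fun d => (PySem.Int.ofChars? [d]).getD 0)).sum) := by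
  induction fuel with
  | zero => intro n acc h; omega
  | succ fuel ih =>
    intro n acc h
    rw [Nat.toDigitsCore]
    by_cases h0 : n / 10 = 0
    · simp only [h0, if_pos]
      have hn : n < 10 := by omega
      rcases Nat.eq_zero_or_pos n with h1 | h1
      · subst h1; simp [euroCharVal_digitChar 0 (by omega)]
      · rw [Nat.digits_def' (by norm_num) h1, h0]
        simp [euroCharVal_digitChar (n % 10) (by omega)]
    · simp only [h0, reduceIte]
      have h10 : 10 ≤ n := by
        by_contra hlt
        exact h0 (Nat.div_eq_of_lt (by omega))
      rw [ih (n / 10) _ (by omega)]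
      rw [Nat.digits_def' (by norm_num) (by omega : 0 < n)]
      simp [euroCharVal_digitChar (n % 10) (by omega)]
      ring

lemma euroDigitSum_eq (n : Int) (hn : 0 ≤ n) :
    euroDigitSum n = ((Nat.digits 10 n.toNat).sum : Int) := by
  unfold euroDigitSum
  rw [PySem.List.foldl_add _ (fun d => (PySem.Int.ofChars? [d]).getD 0)]
  unfold PySem.Int.toChars
  rw [if_neg (by omega)]
  unfold Nat.toDigits
  rw [euroToDigitsCore_sum _ _ _ (by omega)]
  simp

lemma euroDigitSum_mod9 (n : Int) (hn : 0 ≤ n) : euroDigitSum n % 9 = n % 9 := by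
  rw [euroDigitSum_eq n hn]
  have h := Nat.modEq_nine_digits_sum n.toNat
  unfold Nat.ModEq at h
  omega

lemma euroDigitSum_lt (n : Int) (hn : 10 ≤ n) : euroDigitSum n < n ∧ 0 ≤ euroDigitSum n := by
  rw [euroDigitSum_eq n (by omega)]
  have h1 : 0 < n.toNat := by omega
  have hds := Nat.digit_sum_le 10 (n.toNat / 10)
  have key : (Nat.digits 10 n.toNat).sum < n.toNat := by
    rw [Nat.digits_def' (by norm_num : (1:Nat) < 10) h1]
    simp only [List.sum_cons]
    have hds := Nat.digit_sum_le 10 (n.toNat / 10)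
    omega
  have key' : ((Nat.digits 10 n.toNat).sum : Int) < (n.toNat : Int) := by exact_mod_cast key
  constructor
  · omega
  · positivity

lemma euroLoop_inv (fuel : Nat) : ∀ n : Int, 0 ≤ n → n < 10 + fuel →
    0 ≤ euroLoop fuel n ∧ euroLoop fuel n < 10 ∧ euroLoop fuel n % 9 = n % 9 := by
  induction fuel with
  | zero => intro n h0 h10; exact ⟨h0, show n < 10 by omega, rfl⟩
  | succ fuel ih =>
    intro n h0 h10
    rw [euroLoop]
    by_cases hge : n ≥ 10
    · rw [if_pos hge]
      obtain ⟨hlt, hnn⟩ := euroDigitSum_lt n hge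
      obtain ⟨a, b, c⟩ := ih (euroDigitSum n) hnn (by omega)
      exact ⟨a, b, by rw [c, euroDigitSum_mod9 n h0]⟩
    · rw [if_neg hge]; omega

-- ===== VERDICT (by name: the statement is the Claim_ definition above) =====
theorem validate_euro_spec : Claim_equal_validate_euro := by
  intro s _hdom hpre0
  have hpre : ∀ c ∈ s.toList, c ∈ euroChars := by
    intro c hc
    have := List.all_eq_true.mp hpre0 c hc
    simpa using this
  unfold Spec_validate_euro validate_euro validate_euro_alt
  have hbodyA : (fun (convert : Int) (i : Char) =>
      if PySem.Chars.isalpha i then convert + euroAlphabet.getD (String.ofList [i]) 0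
      else convert + (PySem.Int.ofChars? [i]).getD 0)
      = fun convert i => convert + euroValA i := by
    funext convert i; unfold euroValA; split_ifs <;> rfl
  have hmap : s.toList.map euroValA = s.toList.map euroValB :=
    List.map_congr_left (fun c hc => (euroVal_eq_and_nonneg c (hpre c hc)).1)
  simp only [hbodyA, PySem.List.foldl_add _ euroValA,
    PySem.List.foldl_add _ (fun c => (c.toNat : Int) - (if PySem.Chars.isalpha c then 64 else 48)),
    show (fun c => (c.toNat : Int) - (if PySem.Chars.isalpha c then 64 else 48)) = euroValB from rfl, hmap]
  set S : Int := 0 + (s.toList.map euroValB).sum with hS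
  have hSnn : 0 ≤ S := by
    rw [hS]
    have : 0 ≤ (s.toList.map euroValB).sum :=
      List.sum_nonneg (by
        intro x hx
        obtain ⟨c, hc, rfl⟩ := List.mem_map.mp hx
        exact (euroVal_eq_and_nonneg c (hpre c hc)).2)
    omega
  obtain ⟨h0, h10, h9⟩ := euroLoop_inv S.toNat S hSnn (by omega)
  have hmod : PySem.Int.mod S 9 = S % 9 := PySem.Int.mod_eq_emod_of_pos (by norm_num)
  by_cases h7 : euroLoop S.toNat S = 7
  · rw [if_pos h7]
    rw [h7] at h9
    rw [hmod] at *
    exact (beq_iff_eq.mpr (by omega : S % 9 = 7)).symm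
  · rw [if_neg h7]
    rw [hmod] at *
    exact (beq_eq_false_iff_ne.mpr (by omega : S % 9 ≠ 7)).symm
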